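-- pv_equiv track=rewrite | github.com/jake-albert/py-algs | c16/c16p16.py | generate_extremes_list
-- ===== SOURCE A (Python) =====
-- import operator as op
--
-- def generate_extremes_list(lst,mins):
--     """When mins is True, generates and returns a list of running
--     miniima from the right end of the input list. Otherwise, generates
--     and returns a list of running maxima from the left end of the input
--     list.
--
--     Args:
--         lst: A list of integers.
--         mins: A Boolean.
--
--     Returns:
--         A list of integers.
--     """
--     output = [0 for x in range(len(lst))]
--
--     # Track minima from right to left using "less than" operator, and
--     # maxima from left to right using "greater than" operator.
--
--     if mins:
--         extreme = float("inf")
--         order = range(len(lst)-1,-1,-1)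
--         cmp = op.lt
--     else:
--         extreme = float("-inf")
--         order = range(len(lst))
--         cmp = op.gt
--
--     for i in order:
--         if cmp(lst[i],extreme):
--             extreme = lst[i]
--         output[i] = extreme
--
--     return output
-- ===== SOURCE B (Python) =====
-- def _prefix_max(xs):
--     """Divide and conquer: prefix maxima of a concatenation are the left
--     half's prefix maxima followed by the right half's prefix maxima each
--     combined with the left half's overall maximum (= last left prefix max)."""
--     if len(xs) <= 1:
--         return list(xs)
--     m = len(xs) // 2
--     left = _prefix_max(xs[:m])
--     right = _prefix_max(xs[m:])
--     b = left[-1]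
--     return left + [x if x > b else b for x in right]
--
-- def _suffix_min(xs):
--     """Mirror image: suffix minima of a concatenation are the left half's
--     suffix minima each combined with the right half's overall minimum
--     (= first right suffix min), followed by the right half's suffix minima."""
--     if len(xs) <= 1:
--         return list(xs)
--     m = len(xs) // 2
--     left = _suffix_min(xs[:m])
--     right = _suffix_min(xs[m:])
--     b = right[0]
--     return [x if x < b else b for x in left] + right
--
-- def generate_extremes_list(lst, mins):
--     if mins:
--         return _suffix_min(lst)
--     return _prefix_max(lst)
-- ===== Notes on version B (the rewrite author's own statement) =====
-- stated objective: alternative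
-- what changed: Replaces A's single linear pass that threads a running extreme (with an infinity sentinel, operator dispatch and an index-updated preallocated output) by a divide-and-conquer recursion: split the list in half, recursively compute each half's prefix-maxima (resp. suffix-minima), then merge by combining the right (resp. left) half's results with the other half's overall extreme.
import Mathlib
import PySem

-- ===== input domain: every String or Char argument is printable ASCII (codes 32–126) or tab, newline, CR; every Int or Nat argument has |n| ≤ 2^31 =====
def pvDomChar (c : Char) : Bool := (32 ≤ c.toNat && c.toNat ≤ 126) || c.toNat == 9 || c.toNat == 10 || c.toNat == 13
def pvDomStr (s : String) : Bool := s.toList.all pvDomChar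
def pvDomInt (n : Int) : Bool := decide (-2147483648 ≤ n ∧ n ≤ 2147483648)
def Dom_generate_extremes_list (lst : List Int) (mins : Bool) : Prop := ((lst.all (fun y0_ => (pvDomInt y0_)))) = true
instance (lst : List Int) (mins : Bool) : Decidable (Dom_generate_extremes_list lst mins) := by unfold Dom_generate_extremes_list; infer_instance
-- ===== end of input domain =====

-- B replaces A's single sentinel-threaded pass with a divide-and-conquer recursion:
-- halve, recurse, merge with the other half's overall extreme (alternative decomposition).


-- ===== PORT A =====
-- A's loop over `order`; `extreme = none` models the float("±inf") sentinel, with which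
-- any comparison lst[i] cmp ±inf is true (exact, since lst holds ints only).
def pvUpd (cmp : Int → Int → Bool) (extreme : Option Int) (v : Int) : Int :=
  match extreme with
  | none => v                        -- cmp(v, ±inf) always true
  | some e => if cmp v e then v else e

def pvALoop (lst : List Int) (cmp : Int → Int → Bool) (idxs : List Int) (extreme : Option Int)
    (output : List Int) : List Int :=
  match idxs with
  | [] => output
  | i :: rest =>
    let v := PySem.List.pyGetD lst i 0   -- lst[i]; every i produced by range(len(lst)) is in range
    let e' := pvUpd cmp extreme v        -- if cmp(lst[i], extreme): extreme = lst[i]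
    pvALoop lst cmp rest (some e') (output.set i.toNat e')  -- output[i] = extreme

def generate_extremes_list (lst : List Int) (mins : Bool) : List Int :=
  let output := List.replicate lst.length (0 : Int)
  if mins then
    pvALoop lst (fun a b => a < b) (PySem.List.pyRange ((lst.length : Int) - 1) (-1) (-1)) none output  -- op.lt
  else
    pvALoop lst (fun a b => b < a) (PySem.List.pyRange 0 (lst.length : Int) 1) none output  -- op.gt

-- ===== PORT B =====
-- _prefix_max: split at m = len//2, recurse, merge the right half with the left's last prefix max.
-- xs[:m] / xs[m:] ported as take/drop (slice with 0 ≤ m ≤ len); left[-1] via pyGet? (nonempty here, so getD 0 is never used).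
def pvPrefMax (xs : List Int) : List Int :=
  if h : xs.length ≤ 1 then xs
  else
    let m := xs.length / 2
    let left := pvPrefMax (xs.take m)
    let right := pvPrefMax (xs.drop m)
    let b := (PySem.List.pyGet? left (-1)).getD 0
    left ++ right.map (fun x => if b < x then x else b)
  termination_by xs.length
  decreasing_by
  · simp only [List.length_take]; omega
  · simp only [List.length_drop]; omega

-- _suffix_min: mirror image, merging the left half with the right's first suffix min.
def pvSufMin (xs : List Int) : List Int :=
  if h : xs.length ≤ 1 then xs
  else
    let m := xs.length / 2
    let left := pvSufMin (xs.take m)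
    let right := pvSufMin (xs.drop m)
    let b := (PySem.List.pyGet? right 0).getD 0
    left.map (fun x => if x < b then x else b) ++ right
  termination_by xs.length
  decreasing_by
  · simp only [List.length_take]; omega
  · simp only [List.length_drop]; omega

def generate_extremes_list_alt (lst : List Int) (mins : Bool) : List Int :=
  if mins then pvSufMin lst else pvPrefMax lst

-- ===== PRECONDITION & SPEC =====
def Spec_generate_extremes_list (lst : List Int) (mins : Bool) (out : List Int) : Prop := out = generate_extremes_list_alt lst mins
instance (lst : List Int) (mins : Bool) (out : List Int) : Decidable (Spec_generate_extremes_list lst mins out) := by unfold Spec_generate_extremes_list; infer_instance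

-- ===== CLAIM =====
def Claim_equal_generate_extremes_list : Prop := ∀ (lst : List Int) (mins : Bool), Dom_generate_extremes_list lst mins → Spec_generate_extremes_list lst mins (generate_extremes_list lst mins)

-- ===== LEMMAS AND PROOFS =====

-- reference scan: runO f none xs threads the running extreme structurally
def runO (f : Int → Int → Int) : Option Int → List Int → List Int
  | _, [] => []
  | none, x :: t => x :: runO f (some x) t
  | some e, x :: t => f e x :: runO f (some (f e x)) t

-- the state after the scan
def finO (f : Int → Int → Int) : Option Int → List Int → Option Int
  | o, [] => o
  | none, x :: t => finO f (some x) t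
  | some e, x :: t => finO f (some (f e x)) t

theorem length_runO (f : Int → Int → Int) :
    ∀ (l : List Int) (o : Option Int), (runO f o l).length = l.length := by
  intro l
  induction l with
  | nil => intro o; cases o <;> rfl
  | cons x t ih => intro o; cases o <;> simp [runO, ih]

theorem runO_append (f : Int → Int → Int) :
    ∀ (l r : List Int) (o : Option Int),
      runO f o (l ++ r) = runO f o l ++ runO f (finO f o l) r := by
  intro l
  induction l with
  | nil => intro r o; cases o <;> simp [runO, finO]
  | cons x t ih => intro r o; cases o <;> simp [runO, finO, ih]

theorem runO_ne_nil (f : Int → Int → Int) (l : List Int) (o : Option Int) (h : l ≠ []) :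
    runO f o l ≠ [] := by
  intro he
  have := congrArg List.length he
  rw [length_runO] at this
  exact h (List.length_eq_zero_iff.mp this)

theorem getLast?_runO (f : Int → Int → Int) :
    ∀ (l : List Int) (o : Option Int), l ≠ [] → (runO f o l).getLast? = finO f o l := by
  intro l
  induction l with
  | nil => intro o h; exact absurd rfl h
  | cons x t ih =>
    intro o h
    cases t with
    | nil => cases o <;> simp [runO, finO]
    | cons y u =>
      cases o with
      | none =>
        simp only [runO, finO]
        rw [List.getLast?_cons_cons]
        exact ih (some x) (by simp)
      | some e =>
        simp only [runO, finO]
        rw [List.getLast?_cons_cons]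
        exact ih (some (f e x)) (by simp)

theorem map_runO_max :
    ∀ (t : List Int) (e b : Int),
      (runO max (some e) t).map (fun x => max b x) = runO max (some (max b e)) t := by
  intro t
  induction t with
  | nil => intro e b; rfl
  | cons x u ih =>
    intro e b
    simp only [runO, List.map_cons, ih, max_assoc]

theorem map_runO_min :
    ∀ (t : List Int) (e b : Int),
      (runO min (some e) t).map (fun x => min b x) = runO min (some (min b e)) t := by
  intro t
  induction t with
  | nil => intro e b; rfl
  | cons x u ih =>
    intro e b
    simp only [runO, List.map_cons, ih, min_assoc]

theorem runO_some_eq_map_max (b : Int) :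
    ∀ (r : List Int), r ≠ [] → runO max (some b) r = (runO max none r).map (fun x => max b x) := by
  intro r h
  cases r with
  | nil => exact absurd rfl h
  | cons x t => simp only [runO, List.map_cons, map_runO_max]

theorem runO_some_eq_map_min (b : Int) :
    ∀ (r : List Int), r ≠ [] → runO min (some b) r = (runO min none r).map (fun x => min b x) := by
  intro r h
  cases r with
  | nil => exact absurd rfl h
  | cons x t => simp only [runO, List.map_cons, map_runO_min]

theorem pyGet?_zero_head (l : List Int) : PySem.List.pyGet? l 0 = l.head? := by
  cases l with
  | nil => decide
  | cons x t => rw [PySem.List.pyGet?_zero_cons]; rfl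

theorem pvPrefMax_eq (xs : List Int) : pvPrefMax xs = runO max none xs := by
  fun_induction pvPrefMax xs with
  | case1 xs h =>
    match xs, h with
    | [], _ => rfl
    | [x], _ => rfl
  | case2 xs h m left right b ihl ihr =>
    have h2 : 2 ≤ xs.length := by omega
    have hm1 : 1 ≤ m := by simp only [m]; omega
    have hmlt : m < xs.length := by simp only [m]; omega
    have htake : xs.take m ≠ [] := by
      intro he; have := congrArg List.length he
      simp only [List.length_take, List.length_nil] at this; omega
    have hdrop : xs.drop m ≠ [] := by
      intro he; have := congrArg List.length he
      simp only [List.length_drop, List.length_nil] at this; omega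
    obtain ⟨M, hM⟩ : ∃ M, finO max none (xs.take m) = some M := by
      rw [← getLast?_runO max _ none htake]
      exact Option.ne_none_iff_exists'.mp
        (by simpa using runO_ne_nil max (xs.take m) none htake)
    have hb : (PySem.List.pyGet? (runO max none (xs.take m)) (-1)).getD 0 = M := by
      rw [PySem.List.pyGet?_neg_one, getLast?_runO max _ none htake, hM]; rfl
    simp only [b, right, left, ihl, ihr, hb]
    have hmap : (runO max none (xs.drop m)).map (fun x => if M < x then x else M)
        = (runO max none (xs.drop m)).map (fun x => max M x) := by
      apply List.map_congr_left
      intro x _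
      simp only [Int.max_def]
      split_ifs <;> omega
    rw [hmap, ← runO_some_eq_map_max M _ hdrop]
    conv_rhs => rw [← List.take_append_drop m xs]
    rw [runO_append, hM]

theorem pvSufMin_eq (xs : List Int) : pvSufMin xs = (runO min none xs.reverse).reverse := by
  fun_induction pvSufMin xs with
  | case1 xs h =>
    match xs, h with
    | [], _ => rfl
    | [x], _ => rfl
  | case2 xs h m left right b ihl ihr =>
    have h2 : 2 ≤ xs.length := by omega
    have hm1 : 1 ≤ m := by simp only [m]; omega
    have hmlt : m < xs.length := by simp only [m]; omega
    have htake : (xs.take m).reverse ≠ [] := by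
      intro he; have := congrArg List.length he
      simp only [List.length_reverse, List.length_take, List.length_nil] at this; omega
    have hdrop : (xs.drop m).reverse ≠ [] := by
      intro he; have := congrArg List.length he
      simp only [List.length_reverse, List.length_drop, List.length_nil] at this; omega
    obtain ⟨M, hM⟩ : ∃ M, finO min none (xs.drop m).reverse = some M := by
      rw [← getLast?_runO min _ none hdrop]
      exact Option.ne_none_iff_exists'.mp
        (by simpa using runO_ne_nil min (xs.drop m).reverse none hdrop)
    have hb : (PySem.List.pyGet? (runO min none (xs.drop m).reverse).reverse 0).getD 0 = M := by
      rw [pyGet?_zero_head, List.head?_reverse, getLast?_runO min _ none hdrop, hM]; rfl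
    simp only [b, right, left, ihl, ihr, hb]
    have hmap : (runO min none (xs.take m).reverse).reverse.map (fun x => if x < M then x else M)
        = ((runO min none (xs.take m).reverse).map (fun x => min M x)).reverse := by
      rw [List.map_reverse]
      congr 1
      apply List.map_congr_left
      intro x _
      simp only [Int.min_def]
      split_ifs <;> omega
    rw [hmap, ← runO_some_eq_map_min M _ htake, ← hM, ← List.reverse_append,
      ← runO_append, ← List.reverse_append, List.take_append_drop]

-- ===== A-side: the loop computes the scan =====

theorem getD_append_length (done t : List Int) (x d : Int) :
    (done ++ x :: t).getD done.length d = x := by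
  simp [List.getD]

theorem set_append_length {α : Type} :
    ∀ (pre : List α) (o : α) (out : List α) (e : α),
      (pre ++ o :: out).set pre.length e = pre ++ e :: out := by
  intro pre
  induction pre with
  | nil => intro o out e; simp
  | cons p ps ih => intro o out e; simp [ih]

theorem pvUpd_none (cmp : Int → Int → Bool) (v : Int) : pvUpd cmp none v = v := rfl

theorem pvUpd_gt (e v : Int) : pvUpd (fun a b => b < a) (some e) v = max e v := by
  rcases lt_or_ge e v with h | h <;> simp [pvUpd, Int.max_def, h, le_of_lt] <;> omega

theorem pvUpd_lt (e v : Int) : pvUpd (fun a b => a < b) (some e) v = min e v := by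
  rcases lt_or_ge v e with h | h <;> simp [pvUpd, Int.min_def, h] <;> omega

theorem aloop_max :
    ∀ (rest done pre out : List Int) (ext : Option Int),
      pre.length = done.length → out.length = rest.length →
      pvALoop (done ++ rest) (fun a b => b < a)
          (PySem.List.pyRange (done.length : Int) ((done.length : Int) + rest.length) 1)
          ext (pre ++ out)
        = pre ++ runO max ext rest := by
  intro rest
  induction rest with
  | nil =>
    intro done pre out ext hpre hout
    rw [List.length_eq_zero_iff.mp hout]
    rw [PySem.List.pyRange_one_eq_nil (by simp)]
    cases ext <;> simp [pvALoop, runO]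
  | cons x t ih =>
    intro done pre out ext hpre hout
    cases out with
    | nil => simp at hout
    | cons o out' =>
      rw [PySem.List.pyRange_one_cons (by push_cast [List.length_cons]; omega)]
      simp only [pvALoop]
      have hv : PySem.List.pyGetD (done ++ x :: t) (done.length : Int) 0 = x := by
        rw [PySem.List.pyGetD_natCast, getD_append_length]
      rw [hv]
      have hset : ∀ e : Int, (pre ++ o :: out').set ((done.length : Int)).toNat e
          = (pre ++ [e]) ++ out' := by
        intro e
        rw [Int.toNat_natCast, ← hpre, set_append_length]
        simp
      cases ext with
      | none =>
        rw [pvUpd_none, hset x]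
        have happ : done ++ x :: t = (done ++ [x]) ++ t := by simp
        have hlen : ((done.length : Int)) + 1 = ((done ++ [x]).length : Int) := by
          simp only [List.length_append, List.length_cons, List.length_nil]; omega
        have hbound : (done.length : Int) + ((x :: t).length : Int)
            = ((done ++ [x]).length : Int) + (t.length : Int) := by
          simp only [List.length_append, List.length_cons, List.length_nil]; omega
        rw [happ, hlen, hbound,
          ih (done ++ [x]) (pre ++ [x]) out' (some x) (by simp [hpre]) (by simpa using hout)]
        simp [runO]
      | some e =>
        rw [pvUpd_gt, hset (max e x)]
        have happ : done ++ x :: t = (done ++ [x]) ++ t := by simp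
        have hlen : ((done.length : Int)) + 1 = ((done ++ [x]).length : Int) := by
          simp only [List.length_append, List.length_cons, List.length_nil]; omega
        have hbound : (done.length : Int) + ((x :: t).length : Int)
            = ((done ++ [x]).length : Int) + (t.length : Int) := by
          simp only [List.length_append, List.length_cons, List.length_nil]; omega
        rw [happ, hlen, hbound,
          ih (done ++ [x]) (pre ++ [max e x]) out' (some (max e x))
            (by simp [hpre]) (by simpa using hout)]
        simp [runO]

theorem aloop_min :
    ∀ (rest done out post : List Int) (ext : Option Int),
      post.length = done.length → out.length = rest.length →
      pvALoop (rest ++ done) (fun a b => a < b)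
          (PySem.List.pyRange ((rest.length : Int) - 1) (-1) (-1))
          ext (out ++ post)
        = (runO min ext rest.reverse).reverse ++ post := by
  intro rest
  induction rest using List.reverseRecOn with
  | nil =>
    intro done out post ext hpost hout
    rw [List.length_eq_zero_iff.mp hout]
    rw [PySem.List.pyRange_neg_one_eq_nil (by simp)]
    cases ext <;> simp [pvALoop, runO]
  | append_singleton l x ih =>
    intro done out post ext hpost hout
    rcases out.eq_nil_or_concat with h | ⟨u, o, rfl⟩
    · subst h; simp at hout
    · simp only [List.concat_eq_append] at hout ⊢
      have hstart : ((l ++ [x]).length : Int) - 1 = (l.length : Int) := by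
        simp only [List.length_append, List.length_cons, List.length_nil]; omega
      rw [hstart, PySem.List.pyRange_neg_one_cons (by omega)]
      simp only [pvALoop]
      have hv : PySem.List.pyGetD ((l ++ [x]) ++ done) (l.length : Int) 0 = x := by
        rw [PySem.List.pyGetD_natCast]
        have : (l ++ [x]) ++ done = l ++ x :: done := by simp
        rw [this, getD_append_length]
      rw [hv]
      have hul : u.length = l.length := by simpa using hout
      have hset : ∀ e : Int, ((u ++ [o]) ++ post).set ((l.length : Int)).toNat e
          = u ++ e :: post := by
        intro e
        rw [Int.toNat_natCast, ← hul]
        have : (u ++ [o]) ++ post = u ++ o :: post := by simp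
        rw [this, set_append_length]
      have happ : (l ++ [x]) ++ done = l ++ (x :: done) := by simp
      cases ext with
      | none =>
        rw [pvUpd_none, hset x, happ,
          ih (x :: done) u (x :: post) (some x) (by simp [hpost]) hul]
        simp [runO]
      | some e =>
        rw [pvUpd_lt, hset (min e x), happ,
          ih (x :: done) u (min e x :: post) (some (min e x)) (by simp [hpost]) hul]
        simp [runO]

-- ===== VERDICT =====
theorem generate_extremes_list_spec : Claim_equal_generate_extremes_list := by
  intro lst mins _
  unfold Spec_generate_extremes_list generate_extremes_list generate_extremes_list_alt
  cases mins with
  | false =>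
    simp only [if_neg (by decide : ¬ (false = true))]
    have := aloop_max lst [] [] (List.replicate lst.length (0 : Int)) none rfl (by simp)
    simpa [pvPrefMax_eq] using this
  | true =>
    simp only [if_pos]
    have := aloop_min lst [] (List.replicate lst.length (0 : Int)) [] none rfl (by simp)
    simpa [pvSufMin_eq] using this
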